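-- pv_equiv track=rewrite | github.com/Stepan-coder/new_NER | TenderHackPrm/NER/text_markup.py | rebuild_markup
-- ===== SOURCE A (Python) =====
-- from typing import List, Dict, Any
--
-- def rebuild_markup(text_markup: List[Dict[str, Dict[str, str]]]) -> List[Dict[str, Dict[str, str]]]:
--     """
--     This method reformats the markup, combines unmarked elements (the consequences of using Natasha),
--     removes empty elements (arise as a result of using the algorithm)
--     :param text_markup: Markuped text
--     :return List[Dict[str, dict]]
--     """
--     markuped_text = []
--     tm = 0
--     while tm < len(text_markup):
--         this_str = list(text_markup[tm])[0].strip()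
--         this_val = text_markup[tm][list(text_markup[tm])[0]]
--         try:
--             next_str = list(text_markup[tm + 1])[0].strip()
--             next_val = text_markup[tm + 1][list(text_markup[tm + 1])[0]]
--             if len(this_val) == 0 and len(next_val) == 0:
--                 markuped_text.append({f"{this_str} {next_str}".strip(): {}})
--                 tm += 1
--             else:
--                 markuped_text.append({this_str.strip(): this_val})
--         except:
--             markuped_text.append({this_str.strip(): this_val})
--         tm += 1
--     for i in reversed(range(len(markuped_text))):
--         if list(markuped_text[i].keys())[0] == '':
--             del markuped_text[i]
--     return markuped_text
-- ===== SOURCE B (Python) =====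
-- from typing import List, Dict, Any
--
-- def _merge_run(run):
--     # Pairwise-merge the stripped keys of a run of unmarked entries
--     # (an odd-length run keeps its last key as is).
--     keys = []
--     i = 0
--     while i + 1 < len(run):
--         keys.append((run[i][0] + " " + run[i + 1][0]).strip())
--         i += 2
--     if i < len(run):
--         keys.append(run[i][0])
--     return keys
--
-- def _runs(pairs):
--     # Split into maximal runs of entries that agree on whether their value is empty.
--     runs = []
--     i, n = 0, len(pairs)
--     while i < n:
--         e = len(pairs[i][1]) == 0
--         j = i + 1
--         while j < n and (len(pairs[j][1]) == 0) == e: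
--             j += 1
--         runs.append(pairs[i:j])
--         i = j
--     return runs
--
-- def rebuild_markup(text_markup: List[Dict[str, Dict[str, str]]]) -> List[Dict[str, Dict[str, str]]]:
--     # Run-based decomposition: extract (stripped key, value) pairs, split them into
--     # maximal runs by emptiness of the value, pairwise-merge each unmarked run's keys,
--     # and emit everything with empty keys skipped.
--     pairs = [(next(iter(d)).strip(), d[next(iter(d))]) for d in text_markup]
--     out = []
--     for run in _runs(pairs):
--         if len(run[0][1]) == 0:
--             out.extend({k: {}} for k in _merge_run(run) if k)
--         else:
--             out.extend({k: v} for (k, v) in run if k)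
--     return out
-- ===== Notes on version B (the rewrite author's own statement) =====
-- stated objective: alternative
-- what changed: B replaces A's single index walk with look-ahead plus a reversed deletion pass by a run-based decomposition: it strips the keys once, splits the entries into maximal runs by emptiness of the value, pairwise-merges the keys of each unmarked run, and emits the entries with empty keys skipped.
-- outside the precondition, e.g. on rebuild_markup([{}]): A raises IndexError, B raises StopIteration
import Mathlib
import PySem

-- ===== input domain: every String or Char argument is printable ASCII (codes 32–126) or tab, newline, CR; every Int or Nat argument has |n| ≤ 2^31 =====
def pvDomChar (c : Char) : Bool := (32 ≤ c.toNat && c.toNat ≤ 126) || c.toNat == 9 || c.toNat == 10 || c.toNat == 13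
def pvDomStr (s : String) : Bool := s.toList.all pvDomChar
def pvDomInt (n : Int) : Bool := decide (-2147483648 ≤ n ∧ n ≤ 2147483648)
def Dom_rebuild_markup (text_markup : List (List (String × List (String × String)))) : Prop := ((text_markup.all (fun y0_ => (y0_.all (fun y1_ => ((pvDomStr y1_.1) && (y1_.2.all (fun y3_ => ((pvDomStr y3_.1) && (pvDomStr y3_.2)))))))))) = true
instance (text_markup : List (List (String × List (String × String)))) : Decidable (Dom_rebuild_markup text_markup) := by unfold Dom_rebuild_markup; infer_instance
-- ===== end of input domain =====

-- B replaces A's index walk + reversed delete pass by a run-based decomposition: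
-- strip keys once, split into maximal runs by emptiness of the value, pairwise-merge
-- each unmarked run's keys, emit skipping empty keys (objective: alternative).

-- ===== PORT A =====
-- first key / its value of a dict d: list(d)[0] is the first pair's key, and
-- d[list(d)[0]] (first-match lookup of the first key) is the first pair's value;
-- on an empty dict Python raises IndexError (excluded by Pre_), default here.
def pvFirst (d : List (String × List (String × String))) : String × List (String × String) :=
  match d with
  | [] => ("", [])
  | p :: _ => p

-- the while-loop: tm advances by 2 on a merge, else by 1
def pvLoopA : List (List (String × List (String × String))) → List (List (String × List (String × String)))
  | [] => []
  | [d] =>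
    -- tm + 1 out of range: IndexError caught by the bare except
    [[(PySem.Str.strip (PySem.Str.strip (pvFirst d).1), (pvFirst d).2)]]
  | d :: d2 :: rest2 =>
    let this_str := PySem.Str.strip (pvFirst d).1
    let this_val := (pvFirst d).2
    let next_str := PySem.Str.strip (pvFirst d2).1
    let next_val := (pvFirst d2).2
    if this_val.length = 0 ∧ next_val.length = 0 then
      [(PySem.Str.strip (this_str ++ " " ++ next_str), ([] : List (String × String)))] :: pvLoopA rest2
    else
      [(PySem.Str.strip this_str, this_val)] :: pvLoopA (d2 :: rest2)

-- the reversed-range delete loop: entries whose first key is '' are removed, processed back to front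
def pvDelEmpty : List (List (String × List (String × String))) → List (List (String × List (String × String)))
  | [] => []
  | e :: rest =>
    let rest' := pvDelEmpty rest
    if (pvFirst e).1 = "" then rest' else e :: rest'

def rebuild_markup (text_markup : List (List (String × List (String × String)))) : List (List (String × List (String × String))) :=
  pvDelEmpty (pvLoopA text_markup)

-- ===== PORT B =====
-- (next(iter(d)).strip(), d[next(iter(d))]): the first pair, key stripped;
-- empty dict raises StopIteration in Python (excluded by Pre_), default here
def pvPair (d : List (String × List (String × String))) : String × List (String × String) :=
  match d with
  | [] => ("", [])
  | (k, v) :: _ => (PySem.Str.strip k, v)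

-- _merge_run: the while loop walks the run two entries at a time; a trailing
-- odd entry keeps its key
def pvMergeRun : List (String × List (String × String)) → List String
  | [] => []
  | [p] => [p.1]
  | p :: q :: rest => PySem.Str.strip (p.1 ++ " " ++ q.1) :: pvMergeRun rest

-- _runs: each outer-loop step takes the maximal prefix agreeing with the head on
-- emptiness of the value (the j-scan) and recurses on the remainder
def pvRuns : List (String × List (String × String)) → List (List (String × List (String × String)))
  | [] => []
  | p :: ps =>
    (p :: ps.takeWhile (fun q => (q.2.length == 0) == (p.2.length == 0))) ::
      pvRuns (ps.dropWhile (fun q => (q.2.length == 0) == (p.2.length == 0)))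
  termination_by l => l.length
  decreasing_by simp only [List.length_cons]; exact Nat.lt_succ_of_le (List.length_dropWhile_le _ _)

-- the body of the 'for run in _runs(pairs)' loop: the two guarded comprehensions
def pvEmit (run : List (String × List (String × String))) : List (List (String × List (String × String))) :=
  if (run.headD ("", [])).2.length = 0 then
    (pvMergeRun run).filterMap (fun k => if k = "" then none else some [(k, ([] : List (String × String)))])
  else
    run.filterMap (fun p => if p.1 = "" then none else some [p])

def rebuild_markup_alt (text_markup : List (List (String × List (String × String)))) : List (List (String × List (String × String))) :=
  (pvRuns (text_markup.map pvPair)).flatMap pvEmit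

-- ===== PRECONDITION & SPEC =====
-- A raises IndexError exactly when some dict of the input is empty (list(d)[0] on the
-- empty dict, evaluated outside the try for the current entry, which every entry becomes)
def Pre_rebuild_markup (text_markup : List (List (String × List (String × String)))) : Prop :=
  ∀ d ∈ text_markup, d ≠ []
instance (text_markup : List (List (String × List (String × String)))) : Decidable (Pre_rebuild_markup text_markup) := by unfold Pre_rebuild_markup; infer_instance
def pvWitness_rebuild_markup : (List (List (String × List (String × String)))) :=
  [[(" ab ", [])], [("c", [])], [("d", [("x", "y")])]]
def Spec_rebuild_markup (text_markup : List (List (String × List (String × String)))) (out : List (List (String × List (String × String)))) : Prop := out = rebuild_markup_alt text_markup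
instance (text_markup : List (List (String × List (String × String)))) (out : List (List (String × List (String × String)))) : Decidable (Spec_rebuild_markup text_markup out) := by unfold Spec_rebuild_markup; infer_instance

-- ===== CLAIM (what is proved, stated in full; the proofs are below) =====
def Claim_equal_rebuild_markup : Prop := ∀ (text_markup : List (List (String × List (String × String)))), Dom_rebuild_markup text_markup → Pre_rebuild_markup text_markup → Spec_rebuild_markup text_markup (rebuild_markup text_markup)

-- ===== LEMMAS AND PROOFS =====

theorem pv_lstrip_rstrip_lstrip (s : List Char) :
    PySem.Chars.lstrip (PySem.Chars.rstrip (PySem.Chars.lstrip s)) = PySem.Chars.rstrip (PySem.Chars.lstrip s) := by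
  simp only [PySem.Chars.lstrip, PySem.Chars.rstrip]
  set t := List.dropWhile PySem.Chars.isspace s with ht
  set r := (List.dropWhile PySem.Chars.isspace t.reverse).reverse with hr
  have hpre : r <+: t := by
    apply List.reverse_suffix.mp
    rw [hr, List.reverse_reverse]
    exact List.dropWhile_suffix _
  rw [List.dropWhile_eq_self_iff]
  intro hlen
  have hlt : 0 < t.length := lt_of_lt_of_le hlen hpre.length_le
  have hidem : List.dropWhile PySem.Chars.isspace t = t := by
    rw [ht]; exact List.dropWhile_idempotent _ _
  have ht0 := (List.dropWhile_eq_self_iff.mp hidem) hlt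
  rw [hpre.getElem hlen]
  exact ht0

theorem pv_rstrip_idem (s : List Char) :
    PySem.Chars.rstrip (PySem.Chars.rstrip s) = PySem.Chars.rstrip s := by
  simp only [PySem.Chars.rstrip, List.reverse_reverse, List.dropWhile_idempotent]

theorem pv_strip_idem (s : List Char) :
    PySem.Chars.strip (PySem.Chars.strip s) = PySem.Chars.strip s := by
  simp only [PySem.Chars.strip, pv_lstrip_rstrip_lstrip, pv_rstrip_idem]

theorem pv_str_strip_idem (s : String) :
    PySem.Str.strip (PySem.Str.strip s) = PySem.Str.strip s := by
  simp only [PySem.Str.strip, String.toList_ofList, pv_strip_idem]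

-- proof-only bridge: A's walk written directly over the (stripped key, value) pairs
def pvLoopB : List (String × List (String × String)) → List (List (String × List (String × String)))
  | [] => []
  | [(k, v)] => if k = "" then [] else [[(k, v)]]
  | (k, v) :: (k2, v2) :: rest2 =>
    if v.length = 0 ∧ v2.length = 0 then
      let m := PySem.Str.strip (k ++ " " ++ k2)
      (if m = "" then pvLoopB rest2 else [(m, ([] : List (String × String)))] :: pvLoopB rest2)
    else
      (if k = "" then pvLoopB ((k2, v2) :: rest2) else [(k, v)] :: pvLoopB ((k2, v2) :: rest2))

def pvGuard (k : String) (v : List (String × String)) : List (List (String × List (String × String))) :=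
  if k = "" then [] else [[(k, v)]]

theorem pv_main (l : List (List (String × List (String × String)))) :
    pvDelEmpty (pvLoopA l) = pvLoopB (l.map (fun d => (PySem.Str.strip (pvFirst d).1, (pvFirst d).2))) := by
  induction l using pvLoopA.induct with
  | case1 => rfl
  | case2 d =>
    simp only [pvLoopA, List.map, pvLoopB, pvDelEmpty, pvFirst, pv_str_strip_idem]
  | case3 d d2 rest2 _ _ hcond ih =>
    simp only [pvLoopA, List.map, pvLoopB]
    rw [if_pos hcond, if_pos hcond]
    simp only [pvDelEmpty, pvFirst, ih]
  | case4 d d2 rest2 _ _ hcond ih =>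
    simp only [pvLoopA, List.map, pvLoopB]
    rw [if_neg hcond, if_neg hcond]
    simp only [pvDelEmpty, pvFirst, pv_str_strip_idem, ih, List.map_cons]

theorem pvPair_eq (d : List (String × List (String × String))) :
    pvPair d = (PySem.Str.strip (pvFirst d).1, (pvFirst d).2) := by
  cases d with
  | nil => simp [pvPair, pvFirst]; decide
  | cons p rest => cases p; rfl

theorem pvEmit_single_empty (k : String) :
    pvEmit [(k, ([] : List (String × String)))] = if k = "" then [] else [[(k, ([] : List (String × String)))]] := by
  rw [pvEmit]
  simp only [List.headD_cons, List.length_nil, pvMergeRun, List.filterMap_cons,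
    List.filterMap_nil]
  split_ifs <;> simp

theorem pvEmit_cons_empty2 (k k2 : String) (tw : List (String × List (String × String))) :
    pvEmit ((k, ([] : List (String × String))) :: (k2, ([] : List (String × String))) :: tw)
      = (if PySem.Str.strip (k ++ " " ++ k2) = "" then [] else [[(PySem.Str.strip (k ++ " " ++ k2), ([] : List (String × String)))]])
        ++ (pvMergeRun tw).filterMap (fun k => if k = "" then none else some [(k, ([] : List (String × String)))]) := by
  rw [pvEmit]
  simp only [List.headD_cons, List.length_nil, pvMergeRun, List.filterMap_cons]
  split_ifs <;> simp

theorem pvEmit_marked (k : String) (v : List (String × String)) (hv : v.length ≠ 0)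
    (run : List (String × List (String × String))) :
    pvEmit ((k, v) :: run)
      = pvGuard k v ++ run.filterMap (fun p => if p.1 = "" then none else some [p]) := by
  rw [pvEmit]
  simp only [List.headD_cons, if_neg hv, List.filterMap_cons, pvGuard]
  split_ifs <;> simp

theorem pv_peel_empty (rest : List (String × List (String × String))) :
    ((rest.takeWhile (fun q => q.2.length == 0)) |> pvMergeRun |>.filterMap
        (fun k => if k = "" then none else some [(k, ([] : List (String × String)))]))
      ++ (pvRuns (rest.dropWhile (fun q => q.2.length == 0))).flatMap pvEmit
    = (pvRuns rest).flatMap pvEmit := by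
  cases rest with
  | nil => simp [pvRuns, pvMergeRun]
  | cons p r =>
    obtain ⟨k3, v3⟩ := p
    by_cases hv : v3.length = 0
    · have hb : (((k3, v3)).2.length == 0) = true := by simpa using hv
      rw [List.takeWhile_cons, List.dropWhile_cons]
      conv_rhs => rw [pvRuns]
      simp only [hb]
      norm_num
      rw [pvEmit]
      have hv0 : v3 = [] := List.length_eq_zero_iff.mp hv
      subst hv0
      simp
    · have hb : (((k3, v3)).2.length == 0) = false := by simpa using hv
      rw [List.takeWhile_cons, List.dropWhile_cons]
      simp [hb, pvMergeRun]

theorem pv_peel_marked (k : String) (v : List (String × String)) (hv : v.length ≠ 0)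
    (ps : List (String × List (String × String))) :
    (pvRuns ((k, v) :: ps)).flatMap pvEmit = pvGuard k v ++ (pvRuns ps).flatMap pvEmit := by
  have hbv : (v.length == 0) = false := by simpa using hv
  cases ps with
  | nil =>
    rw [pvRuns]
    simp [pvRuns, pvEmit, hv, pvGuard, List.filterMap]
    split_ifs <;> simp
  | cons q r =>
    obtain ⟨k2, v2⟩ := q
    by_cases hv2 : v2.length = 0
    · have hbv2 : (v2.length == 0) = true := by simpa using hv2
      rw [pvRuns, List.takeWhile_cons, List.dropWhile_cons]
      simp only [hbv, hbv2]
      norm_num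
      rw [pvEmit]
      simp only [List.headD_cons, if_neg hv, List.filterMap_cons, List.filterMap_nil, pvGuard]
      split_ifs <;> simp
    · have hbv2 : (v2.length == 0) = false := by simpa using hv2
      rw [pvRuns]
      conv_rhs => rw [pvRuns]
      simp only [List.takeWhile_cons, List.dropWhile_cons, hbv, hbv2]
      norm_num
      rw [pvEmit, pvEmit]
      simp only [List.headD_cons, if_neg hv, if_neg hv2, List.filterMap_cons, pvGuard]
      split_ifs <;> simp

theorem pvLoopB_eq_aux (n : Nat) : ∀ ps : List (String × List (String × String)), ps.length ≤ n → pvLoopB ps = (pvRuns ps).flatMap pvEmit := by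
  induction n with
  | zero =>
    intro ps h
    have : ps = [] := List.eq_nil_of_length_eq_zero (Nat.le_zero.mp h)
    subst this; simp [pvLoopB, pvRuns]
  | succ n ih =>
    intro ps hlen
    rcases ps with _ | ⟨⟨k, v⟩, _ | ⟨⟨k2, v2⟩, rest2⟩⟩
    · simp [pvLoopB, pvRuns]
    · rw [pvLoopB, pvRuns]
      by_cases hv : v.length = 0
      · have hv0 : v = [] := List.length_eq_zero_iff.mp hv
        subst hv0
        simp only [List.takeWhile_nil, List.dropWhile_nil, pvRuns, List.flatMap_cons,
          List.flatMap_nil, List.append_nil, pvEmit_single_empty]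
      · simp only [List.takeWhile_nil, List.dropWhile_nil, pvRuns, List.flatMap_cons,
          List.flatMap_nil, List.append_nil, pvEmit_marked k v hv, List.filterMap_nil, pvGuard]
    · rw [pvLoopB]
      by_cases hcond : v.length = 0 ∧ v2.length = 0
      · obtain ⟨hv, hv2⟩ := hcond
        have hv0 : v = [] := List.length_eq_zero_iff.mp hv
        have hv20 : v2 = [] := List.length_eq_zero_iff.mp hv2
        subst hv0; subst hv20
        rw [if_pos ⟨rfl, rfl⟩]
        rw [pvRuns, List.takeWhile_cons, List.dropWhile_cons]
        norm_num
        rw [pvEmit_cons_empty2, List.append_assoc, pv_peel_empty rest2,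
          ← ih rest2 (by simp at hlen; omega)]
        split_ifs <;> simp
      · rw [if_neg hcond]
        by_cases hv : v.length = 0
        · have hv2 : v2.length ≠ 0 := fun h => hcond ⟨hv, h⟩
          have hv0 : v = [] := List.length_eq_zero_iff.mp hv
          subst hv0
          have hbv2 : (v2.length == 0) = false := by simpa using hv2
          rw [pvRuns, List.takeWhile_cons, List.dropWhile_cons]
          simp only [hbv2]
          norm_num
          rw [pvEmit_single_empty, ← ih ((k2, v2) :: rest2) (by simp at hlen ⊢; omega)]
          split_ifs <;> simp
        · rw [pv_peel_marked k v hv, ← ih ((k2, v2) :: rest2) (by simp at hlen ⊢; omega), pvGuard]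
          split_ifs <;> simp

theorem pvLoopB_eq (ps : List (String × List (String × String))) :
    pvLoopB ps = (pvRuns ps).flatMap pvEmit :=
  pvLoopB_eq_aux ps.length ps (Nat.le_refl _)

-- ===== VERDICT (by name: the statement is the Claim_ definition above) =====
theorem rebuild_markup_spec : Claim_equal_rebuild_markup := by
  intro tm _ _
  unfold Spec_rebuild_markup rebuild_markup rebuild_markup_alt
  rw [pv_main tm, List.map_congr_left (fun d _ => (pvPair_eq d).symm)]
  exact pvLoopB_eq _
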